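-- pv_equiv track=rewrite | github.com/Mhammedhelal/volleyball_activity_recognition | src/utils/subgroups.py | make_subgroup_indices
-- ===== SOURCE A (Python) =====
-- def make_subgroup_indices(n_players: int, n_subgroups: int) -> list[list[int]]:
--     """
--     Split n_players into n_subgroups contiguous buckets.
--     Players must be pre-sorted by bounding-box x-coordinate (left → right).
--
--     n_subgroups=1 → [all players]
--     n_subgroups=2 → [left_team, right_team]
--     n_subgroups=4 → [left_back, left_front, right_back, right_front]
--     """
--     base  = n_players // n_subgroups
--     extra = n_players  % n_subgroups
--     indices, start = [], 0
--     for m in range(n_subgroups):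
--         end = start + base + (1 if m < extra else 0)
--         indices.append(list(range(start, end)))
--         start = end
--     return indices
-- ===== SOURCE B (Python) =====
-- def make_subgroup_indices(n_players: int, n_subgroups: int) -> list[list[int]]:
--     # Inverted traversal: instead of looping over subgroups with a running
--     # cursor, loop over the players once and compute each player's bucket
--     # directly by closed-form division, appending it to that bucket.
--     base, extra = divmod(n_players, n_subgroups)
--     cut = extra * (base + 1)          # first player index owned by a small bucket
--     buckets = [[] for _ in range(n_subgroups)]
--     for p in range(n_players):
--         g = p // (base + 1) if p < cut else extra + (p - cut) // base
--         buckets[g].append(p)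
--     return buckets
-- ===== Notes on version B (the rewrite author's own statement) =====
-- stated objective: alternative
-- what changed: Replaces A's per-subgroup loop with a running start cursor by a single pass over the players that computes each player's bucket index in closed form (p//(base+1) below the cut, extra+(p-cut)//base above) and appends the player there.
-- outside the precondition, e.g. on make_subgroup_indices(3, -2): A returns [], B raises IndexError
import Mathlib
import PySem

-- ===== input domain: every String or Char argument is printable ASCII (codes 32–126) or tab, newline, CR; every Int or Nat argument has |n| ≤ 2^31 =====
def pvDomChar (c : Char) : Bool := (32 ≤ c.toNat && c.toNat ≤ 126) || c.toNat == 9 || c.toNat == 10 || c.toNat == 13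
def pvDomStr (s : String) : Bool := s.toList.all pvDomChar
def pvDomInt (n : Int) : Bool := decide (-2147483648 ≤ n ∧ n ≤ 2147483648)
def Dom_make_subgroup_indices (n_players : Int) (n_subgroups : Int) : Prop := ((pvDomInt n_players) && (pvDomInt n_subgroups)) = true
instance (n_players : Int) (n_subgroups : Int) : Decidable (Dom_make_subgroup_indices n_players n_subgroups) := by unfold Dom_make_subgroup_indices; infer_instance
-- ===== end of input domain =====

-- B inverts the traversal: one pass over the players assigning each to its bucket by closed-form division, instead of A's per-subgroup cursor loop (alternative decomposition, same cost). 


-- ===== PORT A =====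
def make_subgroup_indices (n_players : Int) (n_subgroups : Int) : List (List Int) :=
  let base := PySem.Int.floordiv n_players n_subgroups
  let extra := PySem.Int.mod n_players n_subgroups
  ((PySem.List.pyRange 0 n_subgroups 1).foldl
    (fun (acc : List (List Int) × Int) m =>
      let e := acc.2 + base + (if m < extra then 1 else 0)
      (acc.1 ++ [PySem.List.pyRange acc.2 e 1], e)) ([], 0)).1

-- ===== PORT B =====
def make_subgroup_indices_alt (n_players : Int) (n_subgroups : Int) : List (List Int) :=
  let base := PySem.Int.floordiv n_players n_subgroups
  let extra := PySem.Int.mod n_players n_subgroups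
  let cut := extra * (base + 1)
  let buckets : List (List Int) := (PySem.List.pyRange 0 n_subgroups 1).map (fun _ => ([] : List Int))
  (PySem.List.pyRange 0 n_players 1).foldl
    (fun bs p =>
      let g := if p < cut then PySem.Int.floordiv p (base + 1)
               else extra + PySem.Int.floordiv (p - cut) base
      -- buckets[g].append(p): inside Pre_ the index g is nonnegative and in range,
      -- so List.modify at g.toNat is exactly Python's buckets[g].append(p)
      bs.modify g.toNat (fun l => l ++ [p]))
    buckets

-- ===== PRECONDITION & SPEC =====
-- Pre_ excludes n_subgroups = 0, where A raises ZeroDivisionError (B raises it too),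
-- and the meaningless corner n_subgroups < 0 with n_players > 0, where A's empty range
-- over a negative subgroup count accidentally returns [] while B's per-player bucket
-- assignment raises IndexError.
def Pre_make_subgroup_indices (n_players : Int) (n_subgroups : Int) : Prop :=
  0 < n_subgroups ∨ (n_subgroups < 0 ∧ n_players ≤ 0)
instance (n_players : Int) (n_subgroups : Int) : Decidable (Pre_make_subgroup_indices n_players n_subgroups) := by unfold Pre_make_subgroup_indices; infer_instance
def pvWitness_make_subgroup_indices : Int × Int := (7, 3)

def Spec_make_subgroup_indices (n_players : Int) (n_subgroups : Int) (out : List (List Int)) : Prop := out = make_subgroup_indices_alt n_players n_subgroups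
instance (n_players : Int) (n_subgroups : Int) (out : List (List Int)) : Decidable (Spec_make_subgroup_indices n_players n_subgroups out) := by unfold Spec_make_subgroup_indices; infer_instance

-- ===== CLAIM (what is proved, stated in full; the proofs are below) =====
def Claim_equal_make_subgroup_indices : Prop := ∀ (n_players : Int) (n_subgroups : Int), Dom_make_subgroup_indices n_players n_subgroups → Pre_make_subgroup_indices n_players n_subgroups → Spec_make_subgroup_indices n_players n_subgroups (make_subgroup_indices n_players n_subgroups)

-- ===== LEMMAS AND PROOFS =====

-- contiguous segments of the given sizes starting at s
def pvSegs (s : Int) : List Int → List (List Int)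
  | [] => []
  | a :: rest => PySem.List.pyRange s (s + a) 1 :: pvSegs (s + a) rest

theorem pvSegs_length (sizes : List Int) : ∀ s, (pvSegs s sizes).length = sizes.length := by
  induction sizes with
  | nil => intro s; rfl
  | cons a rest ih => intro s; simp [pvSegs, ih]

theorem pvA_fold (base extra : Int) :
    ∀ (ms : List Int) (res : List (List Int)) (s : Int),
      ms.foldl (fun (acc : List (List Int) × Int) m =>
          (acc.1 ++ [PySem.List.pyRange acc.2 (acc.2 + base + (if m < extra then 1 else 0)) 1],
           acc.2 + base + (if m < extra then 1 else 0))) (res, s)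
      = (res ++ pvSegs s (ms.map (fun m => base + (if m < extra then 1 else 0))),
         s + (ms.map (fun m => base + (if m < extra then 1 else 0))).sum) := by
  intro ms
  induction ms with
  | nil => intro res s; simp [pvSegs]
  | cons m rest ih =>
      intro res s
      simp only [List.foldl_cons, List.map_cons, pvSegs, List.sum_cons]
      rw [ih, add_assoc s base]
      simp [List.append_assoc]
      ring

theorem pvMap_const {f : Int → Int} (c : Int) : ∀ (l : List Int), (∀ x ∈ l, f x = c) →
    l.map f = List.replicate l.length c := by
  intro l
  induction l with
  | nil => intro _; simp
  | cons x rest ih =>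
      intro h
      simp only [List.map_cons, List.length_cons, List.replicate_succ]
      rw [h x (by simp), ih (fun y hy => h y (by simp [hy]))]

theorem pv_sizes_pos (n k : Int) (hk : 0 < k) :
    (PySem.List.pyRange 0 k 1).map
        (fun m => PySem.Int.floordiv n k + (if m < PySem.Int.mod n k then 1 else 0))
      = List.replicate (PySem.Int.mod n k).toNat (PySem.Int.floordiv n k + 1)
        ++ List.replicate (k - PySem.Int.mod n k).toNat (PySem.Int.floordiv n k) := by
  have h0 : (0:Int) ≤ PySem.Int.mod n k := PySem.Int.mod_nonneg n hk
  have h1 : PySem.Int.mod n k < k := PySem.Int.mod_lt n hk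
  rw [PySem.List.pyRange_one_append 0 (PySem.Int.mod n k) k h0 (le_of_lt h1), List.map_append]
  congr 1
  · rw [pvMap_const (PySem.Int.floordiv n k + 1)
      (PySem.List.pyRange 0 (PySem.Int.mod n k) 1)
      (fun x hx => by
        have := (PySem.List.mem_pyRange_one.mp hx).2
        simp [this])]
    rw [PySem.List.length_pyRange_one]
    norm_num
  · rw [pvMap_const (PySem.Int.floordiv n k)
      (PySem.List.pyRange (PySem.Int.mod n k) k 1)
      (fun x hx => by
        have := (PySem.List.mem_pyRange_one.mp hx).1
        simp [not_lt.mpr this])]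
    rw [PySem.List.length_pyRange_one]

-- List.modify at the length of the prefix
theorem pvModifyAt {α : Type} (f : α → α) : ∀ (done : List α) (cur : α) (rest : List α),
    (done ++ cur :: rest).modify done.length f = done ++ f cur :: rest := by
  intro done
  induction done with
  | nil => intro cur rest; simp [List.modify]
  | cons d ds ih =>
      intro cur rest
      simpa [List.modify] using ih cur rest

-- filling one bucket with a block of players all mapped to it
theorem pvFillOne (g : Int → Int) : ∀ (ps : List Int) (done : List (List Int)) (cur : List Int)
    (rest : List (List Int)), (∀ p ∈ ps, g p = (done.length : Int)) →
    ps.foldl (fun bs p => bs.modify (g p).toNat (fun l => l ++ [p])) (done ++ cur :: rest)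
      = done ++ (cur ++ ps) :: rest := by
  intro ps
  induction ps with
  | nil => intro done cur rest _; simp
  | cons p ps ih =>
      intro done cur rest h
      have hg : (g p).toNat = done.length := by
        have := h p (by simp); omega
      simp only [List.foldl_cons, hg, pvModifyAt]
      rw [ih done (cur ++ [p]) rest (fun q hq => h q (by simp [hq]))]
      simp

-- folding the concatenation of the blocks into fresh buckets yields the blocks
theorem pvFoldFill (g : Int → Int) : ∀ (blocks : List (List Int)) (done : List (List Int)),
    (∀ (i : Nat) (p : Int), p ∈ blocks.getD i [] → g p = (done.length : Int) + i) →
    blocks.flatten.foldl (fun bs p => bs.modify (g p).toNat (fun l => l ++ [p]))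
      (done ++ List.replicate blocks.length ([] : List Int))
      = done ++ blocks := by
  intro blocks
  induction blocks with
  | nil => intro done _; simp
  | cons b rest ih =>
      intro done h
      simp only [List.flatten_cons, List.foldl_append, List.length_cons, List.replicate_succ]
      rw [pvFillOne g b done [] (List.replicate rest.length [])
        (fun p hp => by have := h 0 p (by simpa using hp); simpa using this)]
      simp only [List.nil_append]
      have := ih (done ++ [b]) (fun i p hp => by
        have := h (i + 1) p (by simpa using hp)
        simp only [List.length_append, List.length_cons, List.length_nil]
        push_cast
        push_cast at this
        linarith)
      simpa using this

-- segment bounds: a member of the i-th segment lies in its half-open interval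
theorem pvSegs_getD_mem : ∀ (sizes : List Int) (s : Int) (i : Nat) (p : Int),
    p ∈ (pvSegs s sizes).getD i [] →
    s + (sizes.take i).sum ≤ p ∧ p < s + (sizes.take i).sum + sizes.getD i 0 := by
  intro sizes
  induction sizes with
  | nil => intro s i p hp; simp [pvSegs] at hp
  | cons a rest ih =>
      intro s i p hp
      cases i with
      | zero =>
          simp only [pvSegs, List.getD_cons_zero] at hp
          have := PySem.List.mem_pyRange_one.mp hp
          simp only [List.take_zero, List.sum_nil, List.getD_cons_zero]
          omega
      | succ j =>
          simp only [pvSegs, List.getD_cons_succ] at hp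
          have := ih (s + a) j p hp
          simp only [List.take_succ_cons, List.sum_cons, List.getD_cons_succ]
          omega

-- flattening the segments of nonnegative sizes gives the full range
theorem pvSegs_flatten : ∀ (sizes : List Int) (s : Int), (∀ x ∈ sizes, 0 ≤ x) →
    (pvSegs s sizes).flatten = PySem.List.pyRange s (s + sizes.sum) 1 := by
  intro sizes
  induction sizes with
  | nil => intro s _; simp [pvSegs, PySem.List.pyRange_one_eq_nil]
  | cons a rest ih =>
      intro s h
      have ha : 0 ≤ a := h a (by simp)
      have hsum : 0 ≤ rest.sum := List.sum_nonneg (fun x hx => h x (by simp [hx]))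
      simp only [pvSegs, List.flatten_cons, List.sum_cons]
      rw [ih (s + a) (fun x hx => h x (by simp [hx])),
        PySem.List.pyRange_one_append s (s + a) (s + (a + rest.sum)) (by omega) (by omega)]
      ring_nf

-- segments of nonpositive sizes are all empty
theorem pvSegs_nonpos : ∀ (sizes : List Int) (s : Int), (∀ x ∈ sizes, x ≤ 0) →
    pvSegs s sizes = List.replicate sizes.length [] := by
  intro sizes
  induction sizes with
  | nil => intro s _; rfl
  | cons a rest ih =>
      intro s h
      simp only [pvSegs, List.length_cons, List.replicate_succ]
      rw [PySem.List.pyRange_one_eq_nil (by have := h a (by simp); omega),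
        ih (s + a) (fun x hx => h x (by simp [hx]))]

-- ===== VERDICT (by name: the statement is the Claim_ definition above) =====
theorem make_subgroup_indices_spec : Claim_equal_make_subgroup_indices := by
  intro n k _ hpre
  unfold Spec_make_subgroup_indices make_subgroup_indices make_subgroup_indices_alt
  simp only []
  set base := PySem.Int.floordiv n k with hbase
  set extra := PySem.Int.mod n k with hextra
  rcases hpre with hkpos | ⟨hkneg, hn⟩
  · -- 0 < k
    have h0e : (0:Int) ≤ extra := PySem.Int.mod_nonneg n hkpos
    have h1e : extra < k := PySem.Int.mod_lt n hkpos
    have hnk : base * k + extra = n := PySem.Int.floordiv_mul_add_mod n k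
    rw [pvA_fold, pv_sizes_pos n k hkpos]
    simp only [List.nil_append]
    set sizes : List Int :=
      List.replicate extra.toNat (base + 1) ++ List.replicate (k - extra).toNat base with hsizes
    have hlen : sizes.length = k.toNat := by
      simp only [hsizes, List.length_append, List.length_replicate]; omega
    have hmapc : (PySem.List.pyRange 0 k 1).map (fun _ => ([] : List Int))
        = List.replicate (pvSegs 0 sizes).length ([] : List Int) := by
      rw [List.map_const', PySem.List.length_pyRange_one, pvSegs_length, hlen]
      norm_num
    by_cases hn : 0 < n
    · -- n > 0: the players' range is the flattening of the segments
      have hb : 0 ≤ base := by nlinarith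
      have hall : ∀ x ∈ sizes, 0 ≤ x := by
        intro x hx
        simp only [hsizes, List.mem_append, List.mem_replicate] at hx
        rcases hx with ⟨_, rfl⟩ | ⟨_, rfl⟩ <;> omega
      have hsum : sizes.sum = n := by
        simp only [hsizes, List.sum_append, List.sum_replicate_int,
          Int.toNat_of_nonneg h0e, Int.toNat_of_nonneg (by omega : (0:Int) ≤ k - extra)]
        nlinarith
      have hflat : PySem.List.pyRange 0 n 1 = (pvSegs 0 sizes).flatten := by
        rw [pvSegs_flatten sizes 0 hall, hsum]; norm_num
      have cond : ∀ (i : Nat) (p : Int), p ∈ (pvSegs 0 sizes).getD i [] →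
          (if p < extra * (base + 1) then PySem.Int.floordiv p (base + 1)
           else extra + PySem.Int.floordiv (p - extra * (base + 1)) base)
            = (([] : List (List Int)).length : Int) + i := by
        intro i p hp
        by_cases hi : i < sizes.length
        · obtain ⟨hlo, hhi⟩ := pvSegs_getD_mem sizes 0 i p hp
          simp only [List.length_nil, Nat.cast_zero]
          by_cases hie : i < extra.toNat
          · -- one of the first `extra` (larger) buckets
            have htake : (sizes.take i).sum = (i : Int) * (base + 1) := by
              rw [hsizes, List.take_append, List.take_replicate,
                Nat.sub_eq_zero_of_le (by simp; omega), List.take_zero, List.append_nil,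
                List.sum_replicate_int, min_eq_left (by omega)]
            have hgd : sizes.getD i 0 = base + 1 := by
              rw [hsizes, List.getD_append _ _ 0 i (by simp; omega),
                List.getD_replicate _ (by omega)]
            rw [htake] at hlo hhi
            rw [hgd] at hhi
            have hie' : (i : Int) + 1 ≤ extra := by omega
            have hplt : p < extra * (base + 1) := by nlinarith
            rw [if_pos hplt]
            have : PySem.Int.floordiv p (base + 1) = (i : Int) :=
              (PySem.Int.floordiv_eq_iff_of_pos (by omega)).mpr ⟨by omega, by nlinarith⟩
            omega
          · -- one of the remaining (smaller) buckets
            have hie2 : (extra.toNat : Int) = extra := Int.toNat_of_nonneg h0e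
            have hi' : i ≤ extra.toNat + (k - extra).toNat := by
              simp only [hsizes, List.length_append, List.length_replicate] at hi; omega
            have hc : ((i - extra.toNat : Nat) : Int) = (i : Int) - extra := by omega
            have htake : (sizes.take i).sum
                = extra * (base + 1) + ((i : Int) - extra) * base := by
              simp only [hsizes, List.take_append, List.length_replicate,
                List.take_replicate, List.sum_append, List.sum_replicate_int]
              rw [min_eq_right (by omega), min_eq_left (by omega), hie2, hc]
            have hgd : sizes.getD i 0 = base := by
              rw [hsizes, List.getD_append_right _ _ 0 i (by simp; omega),
                List.getD_replicate _ (by simp; omega)]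
            rw [htake] at hlo hhi
            rw [hgd] at hhi
            by_cases hb0 : base = 0
            · omega
            · have hbpos : 0 < base := by omega
              have hge : ¬ p < extra * (base + 1) := by nlinarith
              rw [if_neg hge]
              have : PySem.Int.floordiv (p - extra * (base + 1)) base = (i : Int) - extra :=
                (PySem.Int.floordiv_eq_iff_of_pos hbpos).mpr ⟨by nlinarith, by nlinarith⟩
              omega
        · exfalso
          rw [List.getD_eq_default _ _ (by rw [pvSegs_length]; omega)] at hp
          simp at hp
      have := pvFoldFill
        (fun p => if p < extra * (base + 1) then PySem.Int.floordiv p (base + 1)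
                  else extra + PySem.Int.floordiv (p - extra * (base + 1)) base)
        (pvSegs 0 sizes) [] cond
      rw [hmapc, hflat]
      simpa using this.symm
    · -- n ≤ 0: no players, every bucket stays empty on both sides
      have hball : ∀ x ∈ sizes, x ≤ 0 := by
        intro x hx
        simp only [hsizes, List.mem_append, List.mem_replicate] at hx
        rcases hx with ⟨hne, rfl⟩ | ⟨_, rfl⟩
        · have : 1 ≤ extra := by omega
          nlinarith
        · nlinarith
      rw [PySem.List.pyRange_one_eq_nil (by omega : n ≤ 0), List.foldl_nil, hmapc,
        pvSegs_nonpos sizes 0 hball]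
      simp
  · -- k < 0 ∧ n ≤ 0: both sides are []
    rw [PySem.List.pyRange_one_eq_nil (le_of_lt hkneg),
      PySem.List.pyRange_one_eq_nil hn]
    simp
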